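-- pv_equiv track=rewrite | github.com/zhengyao603/CMPUT175-Backup | cmput175/lab9/exercise_1.py | largeIndex
-- ===== SOURCE A (Python) =====
-- def largeIndex(array, first, last):
--     # TODO: find the index of largest element in given range
--     if first == last:
--         return first
--     else:
--         index = largeIndex(array, first + 1, last)
--         if array[first] > array[index]:
--             return first
--         else:
--             return index
-- ===== SOURCE B (Python) =====
-- def largeIndex(array, first, last):
--     # Iterative scan with O(1) state: walk i upward from first to last, keeping
--     # a running best index; >= so ties resolve to the larger (rightmost) index,
--     # like A's recursion. The loop condition i != last mirrors A's base case.
--     best = first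
--     i = first
--     while i != last:
--         i += 1
--         if array[i] >= array[best]:
--             best = i
--     return best
-- ===== Notes on version B (the rewrite author's own statement) =====
-- stated objective: simpler
-- what changed: Replaces the tail-to-head recursion (which compares array[first] against the recursive result of the rest) with an iterative while loop walking upward and maintaining a running best index in O(1) space, using >= so ties keep the rightmost maximum.
import Mathlib
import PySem

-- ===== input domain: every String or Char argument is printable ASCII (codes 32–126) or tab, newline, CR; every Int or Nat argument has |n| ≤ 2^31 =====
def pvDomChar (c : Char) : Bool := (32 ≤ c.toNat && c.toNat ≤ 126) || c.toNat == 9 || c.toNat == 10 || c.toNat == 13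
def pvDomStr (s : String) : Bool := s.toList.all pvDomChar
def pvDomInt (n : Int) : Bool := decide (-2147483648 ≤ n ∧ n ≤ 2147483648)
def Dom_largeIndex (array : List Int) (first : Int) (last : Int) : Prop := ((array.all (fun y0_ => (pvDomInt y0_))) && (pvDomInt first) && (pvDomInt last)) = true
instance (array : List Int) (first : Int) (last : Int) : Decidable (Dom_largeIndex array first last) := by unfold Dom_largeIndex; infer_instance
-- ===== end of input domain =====

-- B replaces A's recursion with an iterative while loop keeping a running best index (simpler state, O(1) stack).

-- ===== PORT A =====
-- Literal port of A's recursion. array[i] is ported as (pyGet? array i).getD 0: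
-- exact whenever the index is in range, which Pre_ guarantees; Python raises
-- IndexError (or recurses forever when first > last) outside Pre_, where the
-- port's total fallback value is not claimed.
def largeIndex (array : List Int) (first : Int) (last : Int) : Int :=
  if first = last then first
  else if _h : first < last then
    let index := largeIndex array (first + 1) last
    if (PySem.List.pyGet? array first).getD 0 > (PySem.List.pyGet? array index).getD 0 then
      first
    else
      index
  else first  -- unreachable under Pre_ (Python recurses forever when first > last)
termination_by (last - first).toNat
decreasing_by omega

-- ===== PORT B =====
-- the while loop of Source B; the fuel argument only makes the loop total (it is
-- (last - first).toNat + 1, enough for every input with first ≤ last; the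
-- Python loop never terminates normally when first > last, which Pre_ excludes)
def pvWhile (array : List Int) (last : Int) : Nat → Int → Int → Int
  | 0, _i, best => best
  | n + 1, i, best =>
    if i = last then best
    else
      if (PySem.List.pyGet? array (i + 1)).getD 0 ≥ (PySem.List.pyGet? array best).getD 0 then
        pvWhile array last n (i + 1) (i + 1)
      else
        pvWhile array last n (i + 1) best

def largeIndex_alt (array : List Int) (first : Int) (last : Int) : Int :=
  pvWhile array last ((last - first).toNat + 1) first first

-- ===== PRECONDITION & SPEC =====
-- Pre_: first ≤ last (Python A recurses forever otherwise) and every index of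
-- the range [first, last] is a valid Python index of array (IndexError otherwise).
def Pre_largeIndex (array : List Int) (first : Int) (last : Int) : Prop :=
  first ≤ last ∧ (first = last ∨ (-(array.length : Int) ≤ first ∧ last < (array.length : Int)))
instance (array : List Int) (first : Int) (last : Int) : Decidable (Pre_largeIndex array first last) := by
  unfold Pre_largeIndex; infer_instance

def pvWitness_largeIndex : List Int × Int × Int := ([3, 7, 7, 2], 0, 3)

def Spec_largeIndex (array : List Int) (first : Int) (last : Int) (out : Int) : Prop := out = largeIndex_alt array first last
instance (array : List Int) (first : Int) (last : Int) (out : Int) : Decidable (Spec_largeIndex array first last out) := by unfold Spec_largeIndex; infer_instance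

-- ===== CLAIM (what is proved, stated in full; the proofs are below) =====
def Claim_equal_largeIndex : Prop := ∀ (array : List Int) (first : Int) (last : Int), Dom_largeIndex array first last → Pre_largeIndex array first last → Spec_largeIndex array first last (largeIndex array first last)

-- ===== LEMMAS AND PROOFS =====

-- the selection step of B's fold, abstracted over the value function v
def pvSel (v : Int → Int) (best i : Int) : Int := if v i ≥ v best then i else best

-- the fold never decreases the value of the running best index
theorem pvSel_foldl_le (v : Int → Int) (l : List Int) (x : Int) :
    v x ≤ v (List.foldl (pvSel v) x l) := by
  induction l generalizing x with
  | nil => simp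
  | cons i t ih =>
    simp only [List.foldl_cons]
    by_cases h : v i ≥ v x
    · have := ih (pvSel v x i)
      have hstep : v x ≤ v (pvSel v x i) := by simp [pvSel, h]
      omega
    · have := ih (pvSel v x i)
      have hstep : v x ≤ v (pvSel v x i) := by simp [pvSel, h]
      omega

-- characterisation: folding from init x over a nonempty list i :: t returns the
-- fold started at the head, unless its value is beaten strictly by x
theorem pvSel_foldl_cons (v : Int → Int) (t : List Int) (i x : Int) :
    List.foldl (pvSel v) x (i :: t) =
      if v (List.foldl (pvSel v) i t) ≥ v x then List.foldl (pvSel v) i t else x := by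
  induction t generalizing i x with
  | nil => simp [pvSel]
  | cons j t ih =>
    have expand : ∀ (a b : Int) (l : List Int),
        List.foldl (pvSel v) a (b :: l) = List.foldl (pvSel v) (pvSel v a b) l :=
      fun _ _ _ => rfl
    by_cases h : v i ≥ v x
    · have hxi : pvSel v x i = i := by simp [pvSel, h]
      rw [expand x i (j :: t), hxi]
      have hle : v x ≤ v (List.foldl (pvSel v) i (j :: t)) :=
        le_trans h (pvSel_foldl_le v (j :: t) i)
      rw [if_pos hle]
    · have hxi : pvSel v x i = x := by simp [pvSel, h]
      rw [expand x i (j :: t), hxi, ih j x, ih j i]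
      by_cases h1 : v (List.foldl (pvSel v) j t) ≥ v i
      · rw [if_pos h1]
      · rw [if_neg h1]
        have h2 : ¬ v (List.foldl (pvSel v) j t) ≥ v x := by omega
        rw [if_neg h2, if_neg (show ¬ v i ≥ v x from h)]

-- the while loop, with enough fuel, is the selection fold over the index range
theorem pvWhile_eq_foldl (array : List Int) (last : Int) :
    ∀ (n : Nat) (i best : Int), i ≤ last → (last - i).toNat < n →
      pvWhile array last n i best =
        List.foldl (pvSel (fun j => (PySem.List.pyGet? array j).getD 0))
          best (PySem.List.pyRange (i + 1) (last + 1) 1) := by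
  intro n
  induction n with
  | zero => intro i best hle h; omega
  | succ n ih =>
    intro i best hle h
    by_cases hi : i = last
    · subst hi
      rw [pvWhile, if_pos rfl, PySem.List.pyRange_one_eq_nil (le_refl (i + 1))]
      rfl
    by_cases hlt : i < last
    · rw [pvWhile, if_neg hi,
          PySem.List.pyRange_one_cons (by omega : i + 1 < last + 1), List.foldl_cons]
      by_cases hcmp : (PySem.List.pyGet? array (i + 1)).getD 0 ≥
          (PySem.List.pyGet? array best).getD 0
      · rw [if_pos hcmp, ih (i + 1) (i + 1) (by omega) (by omega)]
        have : pvSel (fun j => (PySem.List.pyGet? array j).getD 0) best (i + 1) = i + 1 := by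
          simp [pvSel, hcmp]
        rw [this]
      · rw [if_neg hcmp, ih (i + 1) best (by omega) (by omega)]
        have : pvSel (fun j => (PySem.List.pyGet? array j).getD 0) best (i + 1) = best := by
          simp [pvSel]; omega
        rw [this]
    · omega

-- B's port, written via pvSel (valid whenever first ≤ last)
theorem largeIndex_alt_eq (array : List Int) (first last : Int) (h : first ≤ last) :
    largeIndex_alt array first last =
      List.foldl (pvSel (fun i => (PySem.List.pyGet? array i).getD 0))
        first (PySem.List.pyRange (first + 1) (last + 1) 1) := by
  rw [largeIndex_alt, pvWhile_eq_foldl array last _ first first h (by omega)]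

theorem largeIndex_eq_alt_of_le (array : List Int) :
    ∀ (n : Nat) (first last : Int), first ≤ last → (last - first).toNat = n →
      largeIndex array first last = largeIndex_alt array first last := by
  intro n
  induction n with
  | zero =>
    intro first last hle hn
    have : first = last := by omega
    subst this
    rw [largeIndex, largeIndex_alt_eq array first first le_rfl]
    simp [PySem.List.pyRange_one_eq_nil (le_refl (first + 1))]
  | succ n ih =>
    intro first last hle hn
    have hlt : first < last := by omega
    have hne : first ≠ last := by omega
    rw [largeIndex]
    simp only [hne, if_false, hlt, dif_pos]
    set v : Int → Int := fun i => (PySem.List.pyGet? array i).getD 0 with hv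
    have hrec : largeIndex array (first + 1) last = largeIndex_alt array (first + 1) last :=
      ih (first + 1) last (by omega) (by omega)
    rw [largeIndex_alt_eq array first last hle,
        PySem.List.pyRange_one_cons (by omega : first + 1 < last + 1), pvSel_foldl_cons]
    rw [largeIndex_alt_eq array (first + 1) last (by omega)] at hrec
    rw [← hrec]
    split_ifs <;> omega

-- ===== VERDICT (by name: the statement is the Claim_ definition above) =====
theorem largeIndex_spec : Claim_equal_largeIndex := by
  intro array first last _hdom hpre
  unfold Spec_largeIndex
  exact largeIndex_eq_alt_of_le array (last - first).toNat first last hpre.1 rfl
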